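-- pv_equiv track=rewrite | github.com/msharshitaa/subsequence | carryforward.py | carry_forward
-- ===== SOURCE A (Python) =====
-- def carry_forward(arr):
--     result=0
--     acounter=0
--     for i in range(len(arr)):
--         if arr[i]=='a':
--             acounter+=1
--         elif arr[i]=='g':
--             result+=acounter
--         else:
--             pass
--     return result
-- ===== SOURCE B (Python) =====
-- def carry_forward(arr):
--     return sum(arr[:i].count('a') for i, x in enumerate(arr) if x == 'g')
-- ===== Notes on version B (the rewrite author's own statement) =====
-- stated objective: simpler
-- what changed: Replaces A's single pass with a running 'a'-counter by a one-line sum over enumerate that, for each 'g', re-counts the 'a's in the prefix before it (no mutable accumulators).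
import Mathlib
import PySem

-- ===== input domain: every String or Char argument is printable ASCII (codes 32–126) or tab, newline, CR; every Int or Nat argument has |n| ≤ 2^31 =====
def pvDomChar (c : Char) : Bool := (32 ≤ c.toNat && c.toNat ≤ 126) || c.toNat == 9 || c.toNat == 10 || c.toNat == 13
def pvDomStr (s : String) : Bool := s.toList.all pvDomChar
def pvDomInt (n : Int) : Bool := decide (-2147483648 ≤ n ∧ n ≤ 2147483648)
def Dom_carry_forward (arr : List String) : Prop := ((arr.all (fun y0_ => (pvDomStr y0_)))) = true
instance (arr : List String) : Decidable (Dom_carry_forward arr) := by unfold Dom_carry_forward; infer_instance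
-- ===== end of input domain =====

-- B replaces A's running-accumulator pass by a sum over enumerate that re-counts the 'a's in each 'g' prefix (simpler, no mutable state).


-- ===== PORT A =====
-- for i in range(len(arr)): running (result, acounter)
def carry_forward (arr : List String) : Int :=
  (List.foldl
    (fun (st : Int × Int) i =>
      let x := PySem.List.pyGetD arr i ""
      if x == "a" then (st.1, st.2 + 1)
      else if x == "g" then (st.1 + st.2, st.2)
      else st)
    (0, 0) (PySem.List.pyRange 0 (PySem.List.len arr) 1)).1

-- ===== PORT B =====
-- sum(arr[:i].count('a') for i, x in enumerate(arr) if x == 'g')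
def carry_forward_alt (arr : List String) : Int :=
  List.foldl
    (fun (s : Int) (p : Int × String) =>
      if p.2 == "g"
      then s + (PySem.List.count (PySem.List.slice arr none (some p.1)) "a" : Int)
      else s)
    0 (PySem.List.enumerate arr)

-- ===== PRECONDITION & SPEC =====
def Spec_carry_forward (arr : List String) (out : Int) : Prop := out = carry_forward_alt arr
instance (arr : List String) (out : Int) : Decidable (Spec_carry_forward arr out) := by unfold Spec_carry_forward; infer_instance

-- ===== CLAIM (what is proved, stated in full; the proofs are below) =====
def Claim_equal_carry_forward : Prop := ∀ (arr : List String), Dom_carry_forward arr → Spec_carry_forward arr (carry_forward arr)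

-- ===== LEMMAS AND PROOFS =====

-- reference recursion: result of processing xs with acounter c
def cfSpec : List String → Int → Int
  | [], _ => 0
  | x :: t, c =>
    if x == "a" then cfSpec t (c + 1)
    else if x == "g" then c + cfSpec t c
    else cfSpec t c

lemma cfA_eq (xs : List String) : ∀ (r c : Int),
    (List.foldl
      (fun (st : Int × Int) x =>
        if x == "a" then (st.1, st.2 + 1)
        else if x == "g" then (st.1 + st.2, st.2)
        else st)
      (r, c) xs).1 = r + cfSpec xs c := by
  induction xs with
  | nil => intro r c; simp [cfSpec]
  | cons x t ih =>
    intro r c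
    rw [List.foldl_cons]
    by_cases hx : x == "a"
    · rw [if_pos hx, ih]
      simp [cfSpec, hx]
    · by_cases hg : x == "g"
      · rw [if_neg (by simp [hx]), if_pos hg, ih]
        simp [cfSpec, hx, hg]; ring
      · rw [if_neg (by simp [hx]), if_neg (by simp [hg]), ih]
        simp [cfSpec, hx, hg]

lemma cfB_inv (t : List String) : ∀ (arr : List String) (n : Nat) (acc : Int),
    arr.drop n = t →
    List.foldl
      (fun (s : Int) (p : Int × String) =>
        if p.2 == "g"
        then s + (PySem.List.count (PySem.List.slice arr none (some p.1)) "a" : Int)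
        else s)
      acc (PySem.List.enumerate t (n : Int))
    = acc + cfSpec t ((arr.take n).count "a" : Int) := by
  induction t with
  | nil => intro arr n acc _; simp [PySem.List.enumerate, cfSpec]
  | cons x t ih =>
    intro arr n acc hdrop
    have hn : n < arr.length := by
      by_contra h
      have : arr.drop n = [] := List.drop_eq_nil_of_le (by omega)
      simp [this] at hdrop
    have hdrop' : arr.drop (n + 1) = t := by
      have := congrArg (List.drop 1) hdrop
      simpa [List.drop_drop, Nat.add_comm] using this
    have htake : arr.take (n + 1) = arr.take n ++ [x] := by
      rw [List.take_add]
      have h1 : (arr.drop n).take 1 = [x] := by rw [hdrop]; rfl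
      rw [h1]
    have hcast : ((n : Int) + 1) = ((n + 1 : Nat) : Int) := by push_cast; ring
    have hslice : PySem.List.slice arr none (some (n : Int)) = arr.take n := by
      rw [PySem.List.slice_to arr (by positivity)]; simp
    rw [PySem.List.enumerate_cons, List.foldl_cons, hcast]
    by_cases hx : x == "a"
    · have hx' : x = "a" := beq_iff_eq.mp hx
      rw [if_neg (by simp [hx'])]
      rw [ih arr (n + 1) acc hdrop']
      have : (arr.take (n + 1)).count "a" = (arr.take n).count "a" + 1 := by
        simp [htake, List.count_append, hx']
      rw [this]
      simp [cfSpec, hx']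

    · by_cases hg : x == "g"
      · have hg' : x = "g" := beq_iff_eq.mp hg
        rw [if_pos (by simp [hg'])]
        rw [ih arr (n + 1) _ hdrop']
        have : (arr.take (n + 1)).count "a" = (arr.take n).count "a" := by
          simp [htake, List.count_append, hg']
        rw [this]
        simp [cfSpec, hx, hg, hslice, PySem.List.count]
        ring
      · rw [if_neg (by simpa using hg)]
        rw [ih arr (n + 1) acc hdrop']
        have : (arr.take (n + 1)).count "a" = (arr.take n).count "a" := by
          simp only [htake, List.count_append, List.count_singleton]
          simp [hx]
        rw [this]
        simp [cfSpec, hx, hg]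

-- ===== VERDICT (by name: the statement is the Claim_ definition above) =====
theorem carry_forward_spec : Claim_equal_carry_forward := by
  intro arr _
  unfold Spec_carry_forward carry_forward carry_forward_alt
  rw [PySem.List.foldl_pyRange_zero_pyGetD arr ""
      (fun (st : Int × Int) x =>
        if x == "a" then (st.1, st.2 + 1)
        else if x == "g" then (st.1 + st.2, st.2)
        else st) (0, 0)]
  rw [cfA_eq]
  have h := cfB_inv arr arr 0 0 (by simp)
  simp only [Nat.cast_zero] at h
  rw [h]
  simp
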